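-- pv_equiv track=rewrite | github.com/caddickzac/CognitiveTestsProcessors | CognitiveTestsProcessors_StreamlitApp/pages/serialAddition_to_CombinedCSV.py | extract_data_from_log_frames
-- ===== SOURCE A (Python) =====
-- def extract_data_from_log_frames(content_lines, headers):
--     """
--     Extracts data from log frames based on specified headers.
--     """
--     data = []
--     current_frame_data = {}
--     for line in content_lines:
--         if line.strip() == '*** LogFrame Start ***':
--             if current_frame_data:  # Save previous frame data
--                 data.append(current_frame_data)
--             current_frame_data = {}  # Reset for new frame
--         elif line.strip() == '*** LogFrame End ***':
--             continue  # Skip end marker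
--         else:
--             for header in headers:
--                 header_with_colon = header + ":"
--                 if line.startswith(header_with_colon):
--                     key = header  # Use header without colon as the key
--                     value = line.replace(header_with_colon, "").strip()
--                     current_frame_data[key] = value
--                     break
--
--     if current_frame_data:  # Add the last frame if not empty
--         data.append(current_frame_data)
--
--     return data
-- ===== SOURCE B (Python) =====
-- def extract_data_from_log_frames(content_lines, headers):
--     """
--     Extracts data from log frames based on specified headers.
--     Two-pass version: first split the lines into frame segments at each
--     Start marker, then build each segment's dict and keep the non-empty ones.
--     """
--     # Pass 1: cut into segments at every Start marker.
--     segments = []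
--     current = []
--     for line in content_lines:
--         if line.strip() == '*** LogFrame Start ***':
--             segments.append(current)
--             current = []
--         else:
--             current.append(line)
--     segments.append(current)
--
--     # Pass 2: build one dict per segment.
--     data = []
--     for segment in segments:
--         frame = {}
--         for line in segment:
--             if line.strip() == '*** LogFrame End ***':
--                 continue
--             for header in headers:
--                 header_with_colon = header + ":"
--                 if line.startswith(header_with_colon):
--                     frame[header] = line.replace(header_with_colon, "").strip()
--                     break
--         if frame:
--             data.append(frame)
--     return data
-- ===== Notes on version B (the rewrite author's own statement) =====
-- stated objective: alternative
-- what changed: B is two-pass: it first splits the lines into frame segments at each Start marker, then builds one dict per segment and keeps the non-empty ones, instead of A's single pass carrying the current dict and flushing it at each marker.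
import Mathlib
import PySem

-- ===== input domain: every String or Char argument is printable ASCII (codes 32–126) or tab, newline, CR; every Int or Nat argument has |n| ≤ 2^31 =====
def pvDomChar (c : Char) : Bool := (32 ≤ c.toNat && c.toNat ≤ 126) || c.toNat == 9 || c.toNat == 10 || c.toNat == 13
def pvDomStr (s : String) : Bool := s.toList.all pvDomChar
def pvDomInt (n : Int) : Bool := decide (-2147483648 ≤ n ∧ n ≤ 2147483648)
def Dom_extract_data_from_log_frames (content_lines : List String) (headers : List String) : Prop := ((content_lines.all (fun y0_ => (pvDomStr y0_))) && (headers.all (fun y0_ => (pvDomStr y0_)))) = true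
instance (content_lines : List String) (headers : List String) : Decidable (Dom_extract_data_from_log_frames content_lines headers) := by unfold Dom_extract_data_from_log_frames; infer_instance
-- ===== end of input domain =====

-- B changes the decomposition (two passes: split into segments, then build each frame's dict) — objective: alternative, same cost.

-- ===== PORT A =====
-- inner `for header in headers: … break` loop of A: first matching header with its value
def pvFindA (headers : List String) (line : String) : Option (String × String) :=
  match headers with
  | [] => none
  | h :: hs =>
    let hc := h ++ ":"
    if PySem.Str.startswith line hc then
      some (h, PySem.Str.strip (PySem.Str.replace line hc ""))
    else pvFindA hs line

-- A's single loop, carrying (data, current_frame_data)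
def pvLoopA (headers : List String) :
    List String → List (List (String × String)) → PySem.Dict String String →
    List (List (String × String)) × PySem.Dict String String
  | [], data, cur => (data, cur)
  | line :: rest, data, cur =>
    if PySem.Str.strip line = "*** LogFrame Start ***" then
      pvLoopA headers rest (if cur.items.isEmpty then data else data ++ [cur.items]) PySem.Dict.empty
    else if PySem.Str.strip line = "*** LogFrame End ***" then
      pvLoopA headers rest data cur
    else
      match pvFindA headers line with
      | some (k, v) => pvLoopA headers rest data (cur.insert k v)
      | none => pvLoopA headers rest data cur

def extract_data_from_log_frames (content_lines : List String) (headers : List String) : List (List (String × String)) :=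
  let st := pvLoopA headers content_lines [] PySem.Dict.empty
  if st.2.items.isEmpty then st.1 else st.1 ++ [st.2.items]

-- ===== PORT B =====
-- inner header loop of B (same line-matching rule as A's, kept exactly)
def pvFindB (headers : List String) (line : String) : Option (String × String) :=
  match headers with
  | [] => none
  | h :: hs =>
    let hc := h ++ ":"
    if PySem.Str.startswith line hc then
      some (h, PySem.Str.strip (PySem.Str.replace line hc ""))
    else pvFindB hs line

-- pass 1: cut the lines into segments at every Start marker
def pvSplitLoop : List String → List (List String) → List String → List (List String) × List String
  | [], segs, cur => (segs, cur)
  | line :: rest, segs, cur =>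
    if PySem.Str.strip line = "*** LogFrame Start ***" then
      pvSplitLoop rest (segs ++ [cur]) []
    else
      pvSplitLoop rest segs (cur ++ [line])

-- pass 2, inner loop: build one segment's dict
def pvProcSeg (headers : List String) : List String → PySem.Dict String String → PySem.Dict String String
  | [], frame => frame
  | line :: rest, frame =>
    if PySem.Str.strip line = "*** LogFrame End ***" then
      pvProcSeg headers rest frame
    else
      match pvFindB headers line with
      | some (k, v) => pvProcSeg headers rest (frame.insert k v)
      | none => pvProcSeg headers rest frame

-- pass 2, outer loop: collect the non-empty frames
def pvCollect (headers : List String) : List (List String) → List (List (String × String)) → List (List (String × String))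
  | [], data => data
  | seg :: rest, data =>
    let frame := pvProcSeg headers seg PySem.Dict.empty
    pvCollect headers rest (if frame.items.isEmpty then data else data ++ [frame.items])

def extract_data_from_log_frames_alt (content_lines : List String) (headers : List String) : List (List (String × String)) :=
  let sp := pvSplitLoop content_lines [] []
  pvCollect headers (sp.1 ++ [sp.2]) []

-- ===== PRECONDITION & SPEC =====
def Spec_extract_data_from_log_frames (content_lines : List String) (headers : List String) (out : List (List (String × String))) : Prop := out = extract_data_from_log_frames_alt content_lines headers
instance (content_lines : List String) (headers : List String) (out : List (List (String × String))) : Decidable (Spec_extract_data_from_log_frames content_lines headers out) := by unfold Spec_extract_data_from_log_frames; infer_instance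

-- ===== CLAIM (what is proved, stated in full; the proofs are below) =====
def Claim_equal_extract_data_from_log_frames : Prop := ∀ (content_lines : List String) (headers : List String), Dom_extract_data_from_log_frames content_lines headers → Spec_extract_data_from_log_frames content_lines headers (extract_data_from_log_frames content_lines headers)

-- ===== LEMMAS AND PROOFS =====

theorem pvFind_eq (headers : List String) (line : String) : pvFindA headers line = pvFindB headers line := by
  induction headers with
  | nil => rfl
  | cons h hs ih => simp only [pvFindA, pvFindB]; split <;> simp [ih]

theorem pvSplitLoop_shift (ls : List String) (segs : List (List String)) (cur : List String) :
    pvSplitLoop ls segs cur = (segs ++ (pvSplitLoop ls [] cur).1, (pvSplitLoop ls [] cur).2) := by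
  induction ls generalizing segs cur with
  | nil => simp [pvSplitLoop]
  | cons line rest ih =>
    simp only [pvSplitLoop, List.nil_append]
    split
    · rw [ih (segs ++ [cur]) [], ih [cur] []]; simp
    · rw [ih segs (cur ++ [line]), ih [] (cur ++ [line])]

theorem pvProcSeg_append (headers : List String) (seg : List String) (line : String) (frame : PySem.Dict String String) :
    pvProcSeg headers (seg ++ [line]) frame =
      (if PySem.Str.strip line = "*** LogFrame End ***" then pvProcSeg headers seg frame
       else match pvFindB headers line with
            | some (k, v) => (pvProcSeg headers seg frame).insert k v
            | none => pvProcSeg headers seg frame) := by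
  induction seg generalizing frame with
  | nil =>
    simp only [List.nil_append, pvProcSeg]
  | cons l rest ih =>
    simp only [List.cons_append, pvProcSeg]
    split
    · exact ih frame
    · cases h : pvFindB headers l
      · exact ih frame
      · rename_i p; cases p; exact ih _

theorem pvMain (headers : List String) (ls : List String) (data : List (List (String × String))) (cur : List String) :
    (let st := pvLoopA headers ls data (pvProcSeg headers cur PySem.Dict.empty)
     if st.2.items.isEmpty then st.1 else st.1 ++ [st.2.items]) =
    (let sp := pvSplitLoop ls [] cur
     pvCollect headers (sp.1 ++ [sp.2]) data) := by
  induction ls generalizing data cur with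
  | nil =>
    simp only [pvLoopA, pvSplitLoop, List.nil_append, pvCollect]
  | cons line rest ih =>
    simp only [pvLoopA, pvSplitLoop]
    by_cases hs : PySem.Str.strip line = "*** LogFrame Start ***"
    · simp only [hs, if_true]
      have := ih (if (pvProcSeg headers cur PySem.Dict.empty).items.isEmpty then data
                  else data ++ [(pvProcSeg headers cur PySem.Dict.empty).items]) []
      simp only [pvProcSeg] at this
      rw [this, List.nil_append, pvSplitLoop_shift rest [cur] []]
      simp only [List.cons_append, List.nil_append, pvCollect]
    · simp only [hs, if_false]
      by_cases he : PySem.Str.strip line = "*** LogFrame End ***"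
      · simp only [he, if_true]
        have := ih data (cur ++ [line])
        rw [pvProcSeg_append, he, if_pos rfl] at this
        exact this
      · simp only [he, if_false]
        have := ih data (cur ++ [line])
        rw [pvProcSeg_append, if_neg he, ← pvFind_eq] at this
        cases h : pvFindA headers line <;> simp only [h] at this ⊢
        · exact this
        · rename_i p; cases p; exact this

-- ===== VERDICT (by name: the statement is the Claim_ definition above) =====
theorem extract_data_from_log_frames_spec : Claim_equal_extract_data_from_log_frames := by
  intro content_lines headers _
  unfold Spec_extract_data_from_log_frames extract_data_from_log_frames extract_data_from_log_frames_alt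
  have := pvMain headers content_lines [] []
  simpa only [pvProcSeg] using this
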